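-- pv_equiv track=rewrite | github.com/HaroldJP/taller-2 | punto7.py | tiene_vocales
-- ===== SOURCE A (Python) =====
-- def tiene_vocales(cadena):
--     vocales = "aeiouAEIOU"
--     contador = 0
--     for letra in cadena:
--         if letra in vocales:
--             contador += 1
--             if contador >= 2:
--                 return True
--         else:
--             contador = 0
--     return False
-- ===== SOURCE B (Python) =====
-- def tiene_vocales(cadena):
--     vocales = "aeiouAEIOU"
--     return any(a in vocales and b in vocales for a, b in zip(cadena, cadena[1:]))
-- ===== Notes on version B (the rewrite author's own statement) =====
-- stated objective: idiomatic
-- what changed: Replaced the reset-on-miss run counter loop with a direct any() over adjacent character pairs via zip(cadena, cadena[1:]).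
import Mathlib
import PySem

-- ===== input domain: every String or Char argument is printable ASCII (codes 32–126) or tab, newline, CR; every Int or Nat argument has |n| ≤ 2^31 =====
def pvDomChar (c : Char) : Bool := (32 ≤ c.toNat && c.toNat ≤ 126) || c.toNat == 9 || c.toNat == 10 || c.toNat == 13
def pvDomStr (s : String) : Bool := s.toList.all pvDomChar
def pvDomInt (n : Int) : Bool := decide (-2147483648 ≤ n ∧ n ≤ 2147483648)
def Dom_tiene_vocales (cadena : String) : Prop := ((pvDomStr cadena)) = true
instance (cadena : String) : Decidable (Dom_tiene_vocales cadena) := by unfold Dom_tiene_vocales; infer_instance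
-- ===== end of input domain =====

-- B replaces A's reset-on-miss run counter with a direct scan of adjacent character pairs (idiomatic; same cost).
-- ===== PORT A =====
-- 'letra in vocales' on the vowel string
def pvVowA (letra : Char) : Bool := ("aeiouAEIOU".toList).contains letra

-- the for-loop threading 'contador', with early return on contador >= 2
def pvLoopA : List Char → Nat → Bool
  | [], _ => false
  | letra :: rest, contador =>
    if pvVowA letra then
      if contador + 1 ≥ 2 then true else pvLoopA rest (contador + 1)
    else pvLoopA rest 0

def tiene_vocales (cadena : String) : Bool := pvLoopA cadena.toList 0

-- ===== PORT B =====
def pvVowB (c : Char) : Bool := ("aeiouAEIOU".toList).contains c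

-- any(a in vocales and b in vocales for a, b in zip(cadena, cadena[1:]))
def tiene_vocales_alt (cadena : String) : Bool :=
  (cadena.toList.zip cadena.toList.tail).any (fun p => pvVowB p.1 && pvVowB p.2)

-- ===== PRECONDITION & SPEC =====
def Spec_tiene_vocales (cadena : String) (out : Bool) : Prop := out = tiene_vocales_alt cadena
instance (cadena : String) (out : Bool) : Decidable (Spec_tiene_vocales cadena out) := by unfold Spec_tiene_vocales; infer_instance

-- ===== CLAIM (what is proved, stated in full; the proofs are below) =====
def Claim_equal_tiene_vocales : Prop := ∀ (cadena : String), Dom_tiene_vocales cadena → Spec_tiene_vocales cadena (tiene_vocales cadena)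

-- ===== LEMMAS AND PROOFS =====
-- pairwise recursion view of B
def pvPairs : List Char → Bool
  | a :: b :: rest => (pvVowB a && pvVowB b) || pvPairs (b :: rest)
  | _ => false

lemma pvPairs_eq_any : ∀ xs : List Char,
    (xs.zip xs.tail).any (fun p => pvVowB p.1 && pvVowB p.2) = pvPairs xs := by
  intro xs
  match xs with
  | [] => rfl
  | [a] => rfl
  | a :: b :: rest =>
    have ih := pvPairs_eq_any (b :: rest)
    simp only [List.zip, List.tail_cons] at ih ⊢
    simp only [List.zipWith, List.any_cons, pvPairs, ih]

lemma pvVow_eq (c : Char) : pvVowB c = pvVowA c := rfl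

def pvHeadVow : List Char → Bool
  | [] => false
  | c :: _ => pvVowA c

lemma pvLoop_eq_pairs : ∀ (xs : List Char) (k : Nat),
    pvLoopA xs k = (pvPairs xs || (decide (1 ≤ k) && pvHeadVow xs)) := by
  intro xs
  induction xs with
  | nil => intro k; simp [pvLoopA, pvPairs, pvHeadVow]
  | cons c rest ih =>
    intro k
    by_cases hc : pvVowA c = true
    · rcases Nat.eq_zero_or_pos k with hk | hk
      · subst hk
        simp only [pvLoopA, hc, if_true]
        have : ¬ (0 + 1 ≥ 2) := by omega
        rw [if_neg this, ih 1]
        cases rest with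
        | nil => simp [pvPairs, pvHeadVow]
        | cons d r2 => simp [pvPairs, pvHeadVow, pvVow_eq, hc, Bool.or_comm]
      · simp only [pvLoopA, hc, if_true]
        have : k + 1 ≥ 2 := by omega
        rw [if_pos this]
        simp [pvHeadVow, hc, show 1 ≤ k from hk]
    · simp only [pvLoopA, hc, ih 0]
      cases rest with
      | nil => simp [pvPairs, pvHeadVow, hc]
      | cons d r2 => simp [pvPairs, pvHeadVow, pvVow_eq, hc]

-- ===== VERDICT (by name: the statement is the Claim_ definition above) =====
theorem tiene_vocales_spec : Claim_equal_tiene_vocales := by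
  intro cadena _
  unfold Spec_tiene_vocales tiene_vocales tiene_vocales_alt
  rw [pvPairs_eq_any, pvLoop_eq_pairs]
  simp
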